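-- pv_equiv track=rewrite | github.com/vul-samsung/odometry | scripts/aggregation/random_search.py | get_coefs
-- ===== SOURCE A (Python) =====
-- def get_coefs(vals, current_level, max_depth):
--     if current_level == max_depth:
--         coefs = list()
--         for v in vals:
--             coefs.append([v])
--         return coefs
--     else:
--         coefs = get_coefs(vals, current_level + 1, max_depth)
--         new_coefs = list()
--         for v in vals:
--             for c in coefs:
--                 new_coefs.append([v] + c)
--         return new_coefs
-- ===== SOURCE B (Python) =====
-- def get_coefs(vals, current_level, max_depth):
--     depth = max_depth - current_level
--     if depth < 0:
--         raise ValueError("current_level must not exceed max_depth")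
--     result = [[v] for v in vals]
--     for _ in range(depth):
--         result = [[v] + c for v in vals for c in result]
--     return result
-- ===== Notes on version B (the rewrite author's own statement) =====
-- stated objective: simpler
-- what changed: Replaces the recursion with an iterative level-by-level product build: start from singleton lists and repeat the prefixing step (max_depth - current_level) times; for negative depth B raises ValueError where A hits RecursionError.
import Mathlib
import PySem

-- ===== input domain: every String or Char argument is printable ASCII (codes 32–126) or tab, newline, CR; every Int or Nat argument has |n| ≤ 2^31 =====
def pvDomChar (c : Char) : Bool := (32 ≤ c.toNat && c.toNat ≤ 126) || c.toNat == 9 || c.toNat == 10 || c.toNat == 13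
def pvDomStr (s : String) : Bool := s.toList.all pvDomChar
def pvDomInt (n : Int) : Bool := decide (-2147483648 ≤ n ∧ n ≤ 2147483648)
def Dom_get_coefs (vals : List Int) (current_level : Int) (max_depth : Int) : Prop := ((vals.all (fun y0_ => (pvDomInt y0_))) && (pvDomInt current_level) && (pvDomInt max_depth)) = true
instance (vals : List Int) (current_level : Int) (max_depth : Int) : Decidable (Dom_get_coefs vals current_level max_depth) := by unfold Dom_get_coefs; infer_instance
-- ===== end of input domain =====

-- B replaces A's recursion by an iterative level-by-level build of the product (same cost; objective: simpler).
-- ===== PORT A =====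
-- A's recursion on current_level; the final 'else []' branch is only a totality guard for
-- current_level > max_depth, where the Python recurses without bound (RecursionError) — excluded by Pre_.
def get_coefs (vals : List Int) (current_level : Int) (max_depth : Int) : List (List Int) :=
  if current_level = max_depth then
    vals.foldl (fun coefs v => coefs ++ [[v]]) []
  else if current_level < max_depth then
    let coefs := get_coefs vals (current_level + 1) max_depth
    vals.foldl (fun new_coefs v =>
      coefs.foldl (fun acc c => acc ++ [v :: c]) new_coefs) []
  else []
termination_by (max_depth - current_level).toNat
decreasing_by omega

-- ===== PORT B =====
-- the 'depth < 0' branch is a totality guard: the Python B raises ValueError there (excluded by Pre_)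
def get_coefs_alt (vals : List Int) (current_level : Int) (max_depth : Int) : List (List Int) :=
  let depth := max_depth - current_level
  if depth < 0 then []
  else
    let init := vals.map (fun v => [v])
    (PySem.List.pyRange 0 depth 1).foldl
      (fun result _ => vals.flatMap (fun v => result.map (fun c => v :: c))) init

-- ===== PRECONDITION & SPEC =====
-- Pre_ excludes current_level > max_depth, where the Python A recurses without bound (RecursionError).
def Pre_get_coefs (vals : List Int) (current_level : Int) (max_depth : Int) : Prop :=
  current_level ≤ max_depth
instance (vals : List Int) (current_level : Int) (max_depth : Int) : Decidable (Pre_get_coefs vals current_level max_depth) := by unfold Pre_get_coefs; infer_instance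
def pvWitness_get_coefs : List Int × Int × Int := ([1, 2], 0, 2)

def Spec_get_coefs (vals : List Int) (current_level : Int) (max_depth : Int) (out : List (List Int)) : Prop := out = get_coefs_alt vals current_level max_depth
instance (vals : List Int) (current_level : Int) (max_depth : Int) (out : List (List Int)) : Decidable (Spec_get_coefs vals current_level max_depth out) := by unfold Spec_get_coefs; infer_instance

-- ===== CLAIM (what is proved, stated in full; the proofs are below) =====
def Claim_equal_get_coefs : Prop := ∀ (vals : List Int) (current_level : Int) (max_depth : Int), Dom_get_coefs vals current_level max_depth → Pre_get_coefs vals current_level max_depth → Spec_get_coefs vals current_level max_depth (get_coefs vals current_level max_depth)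

-- ===== LEMMAS AND PROOFS =====

-- the one product step both programs perform
def pvStep (vals : List Int) (r : List (List Int)) : List (List Int) :=
  vals.flatMap (fun v => r.map (fun c => v :: c))

theorem pv_foldl_app (r : List (List Int)) (v : Int) (acc : List (List Int)) :
    r.foldl (fun acc c => acc ++ [v :: c]) acc = acc ++ r.map (fun c => v :: c) := by
  induction r generalizing acc with
  | nil => simp [List.foldl]
  | cons c cs ih => simp [List.foldl, ih]

theorem pv_outer_foldl (vals : List Int) (coefs acc : List (List Int)) :
    vals.foldl (fun new_coefs v => coefs.foldl (fun a c => a ++ [v :: c]) new_coefs) acc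
      = acc ++ pvStep vals coefs := by
  induction vals generalizing acc with
  | nil => simp [List.foldl, pvStep]
  | cons v vs ih =>
    simp only [List.foldl_cons]
    rw [pv_foldl_app, ih]
    simp [pvStep]

theorem pv_base_foldl (vals : List Int) (acc : List (List Int)) :
    vals.foldl (fun coefs v => coefs ++ [[v]]) acc = acc ++ vals.map (fun v => [v]) := by
  induction vals generalizing acc with
  | nil => simp [List.foldl]
  | cons v vs ih => simp [List.foldl, ih]

theorem pv_foldl_const {α : Type} (l : List α) (f : List (List Int) → List (List Int))
    (init : List (List Int)) :
    l.foldl (fun r _ => f r) init = f^[l.length] init := by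
  induction l generalizing init with
  | nil => simp
  | cons x xs ih => simp [List.foldl, ih, Function.iterate_succ_apply]

theorem pv_A_iter (vals : List Int) (n : ℕ) :
    ∀ (cl md : Int), cl ≤ md → (md - cl).toNat = n →
    get_coefs vals cl md = (pvStep vals)^[n] (vals.map (fun v => [v])) := by
  induction n with
  | zero =>
    intro cl md h hn
    have : cl = md := by omega
    rw [get_coefs, if_pos this, pv_base_foldl]
    simp
  | succ n ih =>
    intro cl md h hn
    have hne : ¬ cl = md := by omega
    have hlt : cl < md := by omega
    rw [get_coefs]
    simp only [hne, if_false, hlt, if_true]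
    rw [pv_outer_foldl, ih (cl + 1) md (by omega) (by omega)]
    simp [Function.iterate_succ_apply']

theorem pv_B_iter (vals : List Int) (cl md : Int) (h : cl ≤ md) :
    get_coefs_alt vals cl md = (pvStep vals)^[(md - cl).toNat] (vals.map (fun v => [v])) := by
  unfold get_coefs_alt
  rw [if_neg (by omega : ¬ md - cl < 0), pv_foldl_const, PySem.List.length_pyRange_one]
  simp only [sub_zero]
  rfl

-- ===== VERDICT (by name: the statement is the Claim_ definition above) =====
theorem get_coefs_spec : Claim_equal_get_coefs := by
  intro vals cl md _ hpre
  unfold Spec_get_coefs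
  rw [pv_A_iter vals (md - cl).toNat cl md hpre rfl, pv_B_iter vals cl md hpre]
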